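-- pv_equiv track=rewrite | github.com/chanpa/aoc2022 | days/day10.py | _signal_strengths
-- ===== SOURCE A (Python) =====
-- def _signal_strengths(instructions, interval=40):
--     cycle = 1
--     x = 1
--     signals_strengths = []
--     for instr in instructions:
--         match [part.strip() for part in instr.split(" ")]:
--             case ["noop"]:
--                 cycle += 1
--                 if cycle == 20 or (cycle - 20) % interval == 0:
--                     signals_strengths.append((x, cycle))
--             case ["addx", v]:
--                 for i in range(2):
--                     cycle += 1
--                     if i == 1:
--                         x += int(v)
--                     if cycle == 20 or (cycle - 20) % interval == 0:
--                         signals_strengths.append((x, cycle))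
--
--     return signals_strengths
-- ===== SOURCE B (Python) =====
-- def _signal_strengths(instructions, interval=40):
--     # Pass 1: compress the program into completion events: for each matched
--     # instruction one pair (end_cycle, register_value_after_it), plus the final
--     # cycle count.  No per-cycle simulation, no i==1 flag.
--     events = []
--     cycle = 1
--     x = 1
--     for instr in instructions:
--         parts = [p.strip() for p in instr.split(" ")]
--         if parts == ["noop"]:
--             cycle += 1
--             events.append((cycle, x))
--         elif len(parts) == 2 and parts[0] == "addx":
--             cycle += 2
--             x += int(parts[1])
--             events.append((cycle, x))
--     # Pass 2: merge-scan ticks 2..cycle against the event list: the register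
--     # value observed at tick t is the value of the last event with end <= t
--     # (initially 1).  Emit the checkpoint ticks.
--     out = []
--     val = 1
--     pending = events
--     for t in range(2, cycle + 1):
--         while pending and pending[0][0] <= t:
--             val = pending[0][1]
--             pending = pending[1:]
--         if t == 20 or (t - 20) % interval == 0:
--             out.append((val, t))
--     return out
-- ===== Notes on version B (the rewrite author's own statement) =====
-- stated objective: alternative
-- what changed: A simulates every CPU cycle inside the instruction loop (inner range(2) loop with an i==1 flag, checkpoint test interleaved); B first compresses the program into completion events (end_cycle, register_after) with one event per instruction, then merge-scans the tick numbers 2..final against that sorted event list with a pending pointer, emitting checkpoints; the post-add-on-second-tick quirk falls out of 'value at tick t = last event with end <= t'.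
import Mathlib
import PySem

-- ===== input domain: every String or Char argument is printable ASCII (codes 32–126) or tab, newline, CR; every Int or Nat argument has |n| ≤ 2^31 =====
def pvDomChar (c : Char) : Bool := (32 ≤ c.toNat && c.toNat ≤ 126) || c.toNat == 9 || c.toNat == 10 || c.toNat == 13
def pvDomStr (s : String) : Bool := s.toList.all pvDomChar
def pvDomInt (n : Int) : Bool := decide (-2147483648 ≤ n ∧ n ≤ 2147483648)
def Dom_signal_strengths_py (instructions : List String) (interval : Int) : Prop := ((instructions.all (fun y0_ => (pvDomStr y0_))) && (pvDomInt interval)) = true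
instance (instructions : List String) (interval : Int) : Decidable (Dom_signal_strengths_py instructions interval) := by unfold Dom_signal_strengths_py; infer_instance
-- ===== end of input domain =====

-- B replaces A's per-cycle simulation by two passes: compress the program into completion
-- events (end_cycle, register_after), then merge-scan the tick numbers against that list;
-- same cost, a different algorithmic decomposition.

-- [part.strip() for part in instr.split(" ")]  (shared parsing of one instruction line)
def pvParts (instr : String) : List String :=
  ((PySem.Str.split? instr " ").getD []).map PySem.Str.strip

-- t == 20 or (t - 20) % interval == 0  (checkpoint test; interval ≠ 0 under Pre_)
def pvCheck (interval t : Int) : Bool :=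
  t == 20 || PySem.Int.mod (t - 20) interval == 0

-- ===== PORT A =====
-- one iteration of A's 'for instr in instructions': state = (cycle, x, signals_strengths)
def pvStepA (interval : Int) (s : Int × Int × List (Int × Int)) (instr : String) :
    Int × Int × List (Int × Int) :=
  match pvParts instr with
  | ["noop"] =>
      let cycle := s.1 + 1
      (cycle, s.2.1, if pvCheck interval cycle then s.2.2 ++ [(s.2.1, cycle)] else s.2.2)
  | ["addx", v] =>
      (PySem.List.pyRange 0 2 1).foldl (fun st i =>
        let cycle := st.1 + 1
        let x := if i == 1 then st.2.1 + (PySem.Int.ofStr? v).getD 0 else st.2.1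
        (cycle, x, if pvCheck interval cycle then st.2.2 ++ [(x, cycle)] else st.2.2)) s
  | _ => s

def signal_strengths_py (instructions : List String) (interval : Int) : List (Int × Int) :=
  (instructions.foldl (pvStepA interval) (1, 1, [])).2.2

-- ===== PORT B =====
-- pass 1, one iteration: state = (cycle, x, events); one event (end_cycle, x_after) per line
def pvStep1 (s : Int × Int × List (Int × Int)) (instr : String) :
    Int × Int × List (Int × Int) :=
  let parts := pvParts instr
  if parts == ["noop"] then
    (s.1 + 1, s.2.1, s.2.2 ++ [(s.1 + 1, s.2.1)])
  else if parts.length == 2 && (PySem.List.pyGetD parts 0 "" == "addx") then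
    let x := s.2.1 + (PySem.Int.ofStr? (PySem.List.pyGetD parts 1 "")).getD 0
    (s.1 + 2, x, s.2.2 ++ [(s.1 + 2, x)])
  else s

-- the 'while pending and pending[0][0] <= t' loop: consume due events, keep the last value
def pvAdv (t : Int) : List (Int × Int) → Int → List (Int × Int) × Int
  | [], val => ([], val)
  | e :: rest, val => if e.1 ≤ t then pvAdv t rest e.2 else (e :: rest, val)

-- pass 2, one tick of 'for t in range(2, cycle + 1)': state = (pending, val, out)
def pvTick (interval : Int) (st : List (Int × Int) × Int × List (Int × Int)) (t : Int) :
    List (Int × Int) × Int × List (Int × Int) :=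
  let pv := pvAdv t st.1 st.2.1
  (pv.1, pv.2, if pvCheck interval t then st.2.2 ++ [(pv.2, t)] else st.2.2)

def signal_strengths_py_alt (instructions : List String) (interval : Int) : List (Int × Int) :=
  let p1 := instructions.foldl pvStep1 (1, 1, [])
  ((PySem.List.pyRange 2 (p1.1 + 1) 1).foldl (pvTick interval) (p1.2.2, 1, [])).2.2

-- ===== PRECONDITION & SPEC =====
-- does this line's "addx v" argument parse as a Python int? (True when the line is not an addx)
def pvArgOk (instr : String) : Bool :=
  match pvParts instr with
  | ["addx", v] => (PySem.Int.ofStr? v).isSome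
  | _ => true

-- does this line match either case (so the CPU ticks and the checkpoint test runs)?
def pvMatched (instr : String) : Bool :=
  match pvParts instr with
  | ["noop"] => true
  | ["addx", _] => true
  | _ => false

-- Pre_ excludes exactly the inputs where Python A raises: a matched "addx v" whose v is not
-- int-parsable (ValueError), and interval = 0 with at least one matched line (ZeroDivisionError).
def Pre_signal_strengths_py (instructions : List String) (interval : Int) : Prop :=
  (instructions.all pvArgOk = true) ∧
  (interval ≠ 0 ∨ instructions.all (fun i => !pvMatched i) = true)
instance (instructions : List String) (interval : Int) : Decidable (Pre_signal_strengths_py instructions interval) := by unfold Pre_signal_strengths_py; infer_instance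

def pvWitness_signal_strengths_py : List String × Int :=
  (["noop", "addx 3", "noop"], 2)

def Spec_signal_strengths_py (instructions : List String) (interval : Int) (out : List (Int × Int)) : Prop := out = signal_strengths_py_alt instructions interval
instance (instructions : List String) (interval : Int) (out : List (Int × Int)) : Decidable (Spec_signal_strengths_py instructions interval out) := by unfold Spec_signal_strengths_py; infer_instance

-- ===== CLAIM (what is proved, stated in full; the proofs are below) =====
def Claim_equal_signal_strengths_py : Prop := ∀ (instructions : List String) (interval : Int), Dom_signal_strengths_py instructions interval → Pre_signal_strengths_py instructions interval → Spec_signal_strengths_py instructions interval (signal_strengths_py instructions interval)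

-- ===== LEMMAS AND PROOFS =====

-- normalized form of one A step, by the shape of the parsed line
theorem stepA_noop (interval : Int) (s : Int × Int × List (Int × Int)) (instr : String)
    (h : pvParts instr = ["noop"]) :
    pvStepA interval s instr =
      (s.1 + 1, s.2.1,
        s.2.2 ++ (if pvCheck interval (s.1 + 1) then [(s.2.1, s.1 + 1)] else [])) := by
  simp only [pvStepA, h]
  split_ifs <;> simp

theorem stepA_addx (interval : Int) (s : Int × Int × List (Int × Int)) (instr v : String)
    (h : pvParts instr = ["addx", v]) :
    pvStepA interval s instr =
      (s.1 + 2, s.2.1 + (PySem.Int.ofStr? v).getD 0,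
        s.2.2 ++ ((if pvCheck interval (s.1 + 1) then [(s.2.1, s.1 + 1)] else []) ++
          (if pvCheck interval (s.1 + 2) then
              [(s.2.1 + (PySem.Int.ofStr? v).getD 0, s.1 + 2)] else []))) := by
  have hr : PySem.List.pyRange 0 2 1 = [0, 1] := by decide
  have e2 : s.1 + 1 + 1 = s.1 + 2 := by ring
  simp only [pvStepA, h, hr, List.foldl,
    show (((0 : Int) == 1) = false) from rfl, show (((1 : Int) == 1) = true) from rfl,
    if_true, e2]
  split_ifs <;> simp_all

theorem stepA_other (interval : Int) (s : Int × Int × List (Int × Int)) (instr : String)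
    (h1 : pvParts instr ≠ ["noop"]) (h2 : ∀ v, pvParts instr ≠ ["addx", v]) :
    pvStepA interval s instr = s := by
  unfold pvStepA
  split
  · exact absurd (by assumption) h1
  · exact absurd (by assumption) (h2 _)
  · rfl

-- normalized form of one phase-1 step, by the shape of the parsed line
theorem step1_noop (s : Int × Int × List (Int × Int)) (instr : String)
    (h : pvParts instr = ["noop"]) :
    pvStep1 s instr = (s.1 + 1, s.2.1, s.2.2 ++ [(s.1 + 1, s.2.1)]) := by
  simp [pvStep1, h]

theorem step1_addx (s : Int × Int × List (Int × Int)) (instr v : String)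
    (h : pvParts instr = ["addx", v]) :
    pvStep1 s instr =
      (s.1 + 2, s.2.1 + (PySem.Int.ofStr? v).getD 0,
        s.2.2 ++ [(s.1 + 2, s.2.1 + (PySem.Int.ofStr? v).getD 0)]) := by
  simp [pvStep1, h, PySem.List.pyGetD]

theorem step1_other (s : Int × Int × List (Int × Int)) (instr : String)
    (h1 : pvParts instr ≠ ["noop"]) (h2 : ∀ v, pvParts instr ≠ ["addx", v]) :
    pvStep1 s instr = s := by
  unfold pvStep1
  rcases hp : pvParts instr with _ | ⟨a, _ | ⟨b, _ | ⟨c, t⟩⟩⟩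
  · simp
  · have ha : a ≠ "noop" := fun e => h1 (by rw [hp, e])
    simp [ha]
  · have ha : a ≠ "addx" := fun e => h2 b (by rw [hp, e])
    simp [ha]
  · simp

-- one phase-1 step started from accumulator tr only appends to tr
theorem step1_acc (c x : Int) (tr : List (Int × Int)) (i : String) :
    pvStep1 (c, x, tr) i =
      ((pvStep1 (c, x, ([] : List (Int × Int))) i).1,
       (pvStep1 (c, x, ([] : List (Int × Int))) i).2.1,
       tr ++ (pvStep1 (c, x, ([] : List (Int × Int))) i).2.2) := by
  by_cases hn : pvParts i = ["noop"]
  · rw [step1_noop _ _ hn, step1_noop _ _ hn]; simp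
  · by_cases hx : ∃ v, pvParts i = ["addx", v]
    · obtain ⟨v, hv⟩ := hx
      rw [step1_addx _ _ _ hv, step1_addx _ _ _ hv]; simp
    · push Not at hx
      rw [step1_other _ _ hn hx, step1_other _ _ hn hx]; simp

-- the phase-1 fold started from accumulator tr only appends to tr
theorem fold1_acc (instrs : List String) :
    ∀ (c x : Int) (tr : List (Int × Int)),
    instrs.foldl pvStep1 (c, x, tr) =
      ((instrs.foldl pvStep1 (c, x, [])).1,
       (instrs.foldl pvStep1 (c, x, [])).2.1,
       tr ++ (instrs.foldl pvStep1 (c, x, [])).2.2) := by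
  induction instrs with
  | nil => intro c x tr; simp
  | cons i is ih =>
    intro c x tr
    simp only [List.foldl_cons]
    rw [step1_acc c x tr i]
    obtain ⟨c', x', u, hu⟩ :
        ∃ c' x' u, pvStep1 (c, x, ([] : List (Int × Int))) i = (c', x', u) := ⟨_, _, _, rfl⟩
    rw [hu, ih c' x' (tr ++ u), ih c' x' u]
    simp

-- phase-1 bounds: the final cycle is ≥ the start, and every event ends strictly after the start
theorem fold1_bounds (instrs : List String) :
    ∀ (c x : Int),
      c ≤ (instrs.foldl pvStep1 (c, x, [])).1 ∧
      ∀ e ∈ (instrs.foldl pvStep1 (c, x, [])).2.2, c < e.1 := by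
  induction instrs with
  | nil => intro c x; simp
  | cons i is ih =>
    intro c x
    simp only [List.foldl_cons]
    by_cases hn : pvParts i = ["noop"]
    · rw [step1_noop (c, x, []) i hn]
      dsimp only
      rw [fold1_acc is (c + 1) x]
      obtain ⟨h1, h2⟩ := ih (c + 1) x
      refine ⟨by omega, ?_⟩
      intro e he
      simp only [List.mem_append, List.mem_cons, List.not_mem_nil, or_false, false_or] at he
      rcases he with rfl | he
      · show c < c + 1; omega
      · have := h2 e he; omega
    · by_cases hx : ∃ v, pvParts i = ["addx", v]
      · obtain ⟨v, hv⟩ := hx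
        rw [step1_addx (c, x, []) i v hv]
        dsimp only
        rw [fold1_acc is (c + 2) (x + (PySem.Int.ofStr? v).getD 0)]
        obtain ⟨h1, h2⟩ := ih (c + 2) (x + (PySem.Int.ofStr? v).getD 0)
        refine ⟨by omega, ?_⟩
        intro e he
        simp only [List.mem_append, List.mem_cons, List.not_mem_nil, or_false, false_or] at he
        rcases he with rfl | he
        · show c < c + 2; omega
        · have := h2 e he; omega
      · push Not at hx
        rw [step1_other (c, x, []) i hn hx]
        exact ih c x

-- the while loop does nothing when no pending event is due
theorem pvAdv_stop (t : Int) (E : List (Int × Int)) (val : Int)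
    (h : ∀ e ∈ E, t < e.1) : pvAdv t E val = (E, val) := by
  cases E with
  | nil => rfl
  | cons e rest =>
    have := h e (List.mem_cons_self)
    simp [pvAdv, show ¬ e.1 ≤ t by omega]

-- the while loop consumes a due head event
theorem pvAdv_take (t : Int) (e : Int × Int) (E : List (Int × Int)) (val : Int)
    (h : e.1 ≤ t) : pvAdv t (e :: E) val = pvAdv t E e.2 := by
  simp [pvAdv, h]

-- the tick scan started from accumulator acc only appends to acc
theorem scan_acc (interval : Int) (ticks : List Int) :
    ∀ (E : List (Int × Int)) (v : Int) (acc : List (Int × Int)),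
    ticks.foldl (pvTick interval) (E, v, acc) =
      ((ticks.foldl (pvTick interval) (E, v, [])).1,
       (ticks.foldl (pvTick interval) (E, v, [])).2.1,
       acc ++ (ticks.foldl (pvTick interval) (E, v, [])).2.2) := by
  induction ticks with
  | nil => intro E v acc; simp
  | cons t ts ih =>
    intro E v acc
    simp only [List.foldl_cons, pvTick]
    rcases hadv : pvAdv t E v with ⟨E', v'⟩
    by_cases hc : pvCheck interval t = true
    · simp only [hc, if_true, List.nil_append]
      rw [ih E' v' (acc ++ [(v', t)]), ih E' v' [(v', t)]]
      simp
    · simp only [hadv, Bool.not_eq_true] at *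
      simp only [hc, List.nil_append]
      exact ih E' v' acc
  
-- main invariant: A's interleaved fold = phase-1 events, then the merge-scan over the ticks
theorem main_inv (interval : Int) (instrs : List String) :
    ∀ (c x : Int) (acc : List (Int × Int)),
    instrs.foldl (pvStepA interval) (c, x, acc) =
      ((instrs.foldl pvStep1 (c, x, [])).1,
       (instrs.foldl pvStep1 (c, x, [])).2.1,
       acc ++ ((PySem.List.pyRange (c + 1) ((instrs.foldl pvStep1 (c, x, [])).1 + 1) 1).foldl
         (pvTick interval) ((instrs.foldl pvStep1 (c, x, [])).2.2, x, [])).2.2) := by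
  induction instrs with
  | nil =>
    intro c x acc
    simp [PySem.List.pyRange_one_eq_nil (by omega : (c:Int) + 1 ≥ c + 1)]
  | cons i is ih =>
    intro c x acc
    simp only [List.foldl_cons]
    by_cases hn : pvParts i = ["noop"]
    · -- noop: one tick c+1, its event is consumed at that tick
      rw [stepA_noop interval (c, x, acc) i hn, step1_noop (c, x, []) i hn]
      dsimp only
      rw [List.nil_append, fold1_acc is (c + 1) x [(c + 1, x)]]
      obtain ⟨hc1, hev⟩ := fold1_bounds is (c + 1) x
      dsimp only
      rw [PySem.List.pyRange_one_cons (by omega :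
            (c:Int) + 1 < (is.foldl pvStep1 (c + 1, x, [])).1 + 1)]
      simp only [List.foldl_cons, pvTick]
      rw [show ([(c + 1, x)] ++ (is.foldl pvStep1 (c + 1, x, [])).2.2)
            = (c + 1, x) :: (is.foldl pvStep1 (c + 1, x, [])).2.2 from rfl,
          pvAdv_take (c + 1) (c + 1, x) _ x (by omega),
          pvAdv_stop (c + 1) _ x (fun e he => hev e he)]
      dsimp only [List.nil_append]
      rw [scan_acc interval _ _ x (if pvCheck interval (c + 1) then [(x, c + 1)] else [])]
      rw [ih (c + 1) x (acc ++ if pvCheck interval (c + 1) = true then [(x, c + 1)] else [])]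
      split_ifs <;> simp
    · by_cases hx : ∃ v, pvParts i = ["addx", v]
      · -- addx: ticks c+1 (event not yet due) and c+2 (event consumed)
        obtain ⟨v, hv⟩ := hx
        rw [stepA_addx interval (c, x, acc) i v hv, step1_addx (c, x, []) i v hv]
        dsimp only
        set d := (PySem.Int.ofStr? v).getD 0 with hd
        rw [List.nil_append, fold1_acc is (c + 2) (x + d) [(c + 2, x + d)]]
        obtain ⟨hc1, hev⟩ := fold1_bounds is (c + 2) (x + d)
        dsimp only
        rw [PySem.List.pyRange_one_cons (by omega :
              (c:Int) + 1 < (is.foldl pvStep1 (c + 2, x + d, [])).1 + 1),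
            PySem.List.pyRange_one_cons (by omega :
              (c:Int) + 1 + 1 < (is.foldl pvStep1 (c + 2, x + d, [])).1 + 1)]
        simp only [List.foldl_cons, pvTick]
        rw [show ([(c + 2, x + d)] ++ (is.foldl pvStep1 (c + 2, x + d, [])).2.2)
              = (c + 2, x + d) :: (is.foldl pvStep1 (c + 2, x + d, [])).2.2 from rfl,
            pvAdv_stop (c + 1) _ x (by
              intro e he
              rcases List.mem_cons.mp he with he | he
              · simp [he]
              · have := hev e he; omega)]
        dsimp only [List.nil_append]
        rw [show (c:Int) + 1 + 1 = c + 2 from by ring,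
            pvAdv_take (c + 2) (c + 2, x + d) _ x (by omega),
            pvAdv_stop (c + 2) _ (x + d) (fun e he => hev e he)]
        dsimp only
        have hsplit : (if pvCheck interval (c + 2) = true then
              (if pvCheck interval (c + 1) = true then [(x, c + 1)] else []) ++ [(x + d, c + 2)]
            else if pvCheck interval (c + 1) = true then [(x, c + 1)] else [])
            = ((if pvCheck interval (c + 1) = true then [(x, c + 1)] else []) ++
               (if pvCheck interval (c + 2) = true then [(x + d, c + 2)] else [])) := by
          split_ifs <;> simp
        rw [hsplit,
            scan_acc interval _ _ (x + d)
              ((if pvCheck interval (c + 1) then [(x, c + 1)] else []) ++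
               (if pvCheck interval (c + 2) then [(x + d, c + 2)] else []))]
        rw [ih (c + 2) (x + d)
              (acc ++ ((if pvCheck interval (c + 1) then [(x, c + 1)] else []) ++
                (if pvCheck interval (c + 2) then [(x + d, c + 2)] else [])))]
        split_ifs <;> simp
      · push Not at hx
        rw [stepA_other interval (c, x, acc) i hn hx, step1_other (c, x, []) i hn hx]
        exact ih c x acc

-- ===== VERDICT (by name: the statement is the Claim_ definition above) =====
theorem signal_strengths_py_spec : Claim_equal_signal_strengths_py := by
  intro instructions interval _ _
  unfold Spec_signal_strengths_py signal_strengths_py signal_strengths_py_alt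
  rw [main_inv interval instructions 1 1 []]
  norm_num
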